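-- pv_equiv track=rewrite | github.com/Luka-Mrc/chess-detection | scripts/evaluate_pieces.py | fen_to_board
-- ===== SOURCE A (Python) =====
-- FEN_TO_LABEL = {
--     'P': 'wp', 'N': 'wn', 'B': 'wb', 'R': 'wr', 'Q': 'wq', 'K': 'wk',
--     'p': 'bp', 'n': 'bn', 'b': 'bb', 'r': 'br', 'q': 'bq', 'k': 'bk',
-- }
--
-- def fen_to_board(fen: str) -> dict[str, str]:
--     """Convert FEN piece-placement string to {square: label} dict."""
--     board: dict[str, str] = {}
--     ranks = fen.split('/')
--     for rank_idx, rank_str in enumerate(ranks):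
--         rank_num = 8 - rank_idx
--         file_idx = 0
--         for ch in rank_str:
--             if ch.isdigit():
--                 file_idx += int(ch)
--             else:
--                 square = chr(ord('a') + file_idx) + str(rank_num)
--                 board[square] = FEN_TO_LABEL[ch]
--                 file_idx += 1
--     return board
-- ===== SOURCE B (Python) =====
-- FEN_TO_LABEL = {
--     'P': 'wp', 'N': 'wn', 'B': 'wb', 'R': 'wr', 'Q': 'wq', 'K': 'wk',
--     'p': 'bp', 'n': 'bn', 'b': 'bb', 'r': 'br', 'q': 'bq', 'k': 'bk',
-- }
--
-- def fen_to_board(fen: str) -> dict[str, str]: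
--     """Convert FEN piece-placement string to {square: label} dict."""
--     board: dict[str, str] = {}
--     for rank_idx, rank_str in enumerate(fen.split('/')):
--         expanded = ''.join('.' * int(ch) if ch.isdigit() else ch for ch in rank_str)
--         for pos, ch in enumerate(expanded):
--             if ch != '.':
--                 board[chr(ord('a') + pos) + str(8 - rank_idx)] = FEN_TO_LABEL[ch]
--     return board
-- ===== Notes on version B (the rewrite author's own statement) =====
-- stated objective: idiomatic
-- what changed: Replaces the hand-maintained file_idx accumulator with enumeration over a pre-expanded rank string in which each digit is replaced by that many '.' placeholders, so the square's file comes from the enumeration position.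
-- outside the precondition, e.g. on fen_to_board('.'): A raises KeyError, B returns {}
import Mathlib
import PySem

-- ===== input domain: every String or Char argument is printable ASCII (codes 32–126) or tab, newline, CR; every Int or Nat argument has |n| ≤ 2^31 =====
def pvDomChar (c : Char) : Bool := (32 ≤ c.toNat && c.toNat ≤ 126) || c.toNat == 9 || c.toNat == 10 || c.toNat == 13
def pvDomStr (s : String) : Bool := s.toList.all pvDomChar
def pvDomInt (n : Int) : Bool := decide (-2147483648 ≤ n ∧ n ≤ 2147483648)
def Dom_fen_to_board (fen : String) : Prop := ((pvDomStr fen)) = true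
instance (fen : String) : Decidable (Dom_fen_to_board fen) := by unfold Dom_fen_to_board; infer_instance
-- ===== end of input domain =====

-- B enumerates a pre-expanded rank string (digits become runs of '.') instead of maintaining A's file_idx accumulator; equal on all inputs where A returns.

-- shared module-level constant FEN_TO_LABEL (single-character string keys modelled as Char)
def FEN_TO_LABEL : PySem.Dict Char String :=
  PySem.Dict.ofList [('P', "wp"), ('N', "wn"), ('B', "wb"), ('R', "wr"), ('Q', "wq"), ('K', "wk"),
                     ('p', "bp"), ('n', "bn"), ('b', "bb"), ('r', "br"), ('q', "bq"), ('k', "bk")]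

-- ===== PORT A =====
-- body of A's inner 'for ch in rank_str' loop; state = (board, file_idx); on KeyError (outside Pre_) the board is left unchanged
def stepA (rank_num : Int) (st : PySem.Dict String String × Int) (ch : Char) :
    PySem.Dict String String × Int :=
  if PySem.Chars.isdigit ch then
    (st.1, st.2 + (PySem.Int.ofStr? (String.mk [ch])).getD 0)
  else
    let square := String.mk (Char.ofNat ('a'.toNat + st.2.toNat) :: PySem.Int.toChars rank_num)
    match FEN_TO_LABEL.get? ch with
    | some lbl => (st.1.insert square lbl, st.2 + 1)
    | none => (st.1, st.2 + 1)

def fen_to_board (fen : String) : List (String × String) :=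
  ((PySem.List.enumerate (PySem.Chars.splitOn fen.toList ['/']) 0).foldl
    (fun (board : PySem.Dict String String) p =>
      ((p.2.foldl (stepA (8 - p.1)) (board, 0)).1))
    PySem.Dict.empty).items

-- ===== PORT B =====
-- expanded rank string: each digit becomes that many '.' placeholders
def expandB (chars : List Char) : List Char :=
  chars.flatMap (fun ch =>
    if PySem.Chars.isdigit ch then
      List.replicate ((PySem.Int.ofStr? (String.mk [ch])).getD 0).toNat '.'
    else [ch])

-- body of B's 'for pos, ch in enumerate(expanded)' loop
def stepB (rank_num : Int) (board : PySem.Dict String String) (q : Int × Char) :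
    PySem.Dict String String :=
  if q.2 ≠ '.' then
    match FEN_TO_LABEL.get? q.2 with
    | some lbl => board.insert (String.mk (Char.ofNat ('a'.toNat + q.1.toNat) :: PySem.Int.toChars rank_num)) lbl
    | none => board
  else board

def fen_to_board_alt (fen : String) : List (String × String) :=
  ((PySem.List.enumerate (PySem.Chars.splitOn fen.toList ['/']) 0).foldl
    (fun (board : PySem.Dict String String) p =>
      (PySem.List.enumerate (expandB p.2) 0).foldl (stepB (8 - p.1)) board)
    PySem.Dict.empty).items

-- ===== PRECONDITION & SPEC =====
def pvFenChar (c : Char) : Bool :=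
  decide (c ∈ ['0','1','2','3','4','5','6','7','8','9','P','N','B','R','Q','K','p','n','b','r','q','k'])

-- Pre_ excludes strings containing a character other than the rank separator, a digit or a FEN piece letter:
-- on those A raises KeyError at the first such character (B raises the same KeyError there,
-- except that B silently skips '.' characters, its internal placeholder).
def Pre_fen_to_board (fen : String) : Prop :=
  ((PySem.Chars.splitOn fen.toList ['/']).all (fun r => r.all pvFenChar)) = true
instance (fen : String) : Decidable (Pre_fen_to_board fen) := by unfold Pre_fen_to_board; infer_instance

def pvWitness_fen_to_board : String := "rnbqkbnr/pppppppp/8/8/8/8/PPPPPPPP/RNBQKBNR"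

def Spec_fen_to_board (fen : String) (out : List (String × String)) : Prop := out = fen_to_board_alt fen
instance (fen : String) (out : List (String × String)) : Decidable (Spec_fen_to_board fen out) := by unfold Spec_fen_to_board; infer_instance

-- ===== CLAIM (what is proved, stated in full; the proofs are below) =====
def Claim_equal_fen_to_board : Prop := ∀ (fen : String), Dom_fen_to_board fen → Pre_fen_to_board fen → Spec_fen_to_board fen (fen_to_board fen)

-- ===== LEMMAS AND PROOFS =====

-- facts about every allowed character, by evaluation over the 22-element list
theorem pvFenChar_facts :
    ∀ (c : Char), pvFenChar c = true →
      c ≠ '.' ∧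
      (PySem.Chars.isdigit c = true →
        (PySem.Int.ofStr? (String.mk [c])).getD 0 = ((c.toNat - 48 : Nat) : Int)) := by
  intro c hc
  unfold pvFenChar at hc
  simp only [decide_eq_true_eq, List.mem_cons, List.not_mem_nil, or_false] at hc
  rcases hc with h|h|h|h|h|h|h|h|h|h|h|h|h|h|h|h|h|h|h|h|h|h <;> subst h <;> exact ⟨by decide, by decide⟩

-- stepB skips every '.' of an expanded digit run
theorem foldl_stepB_replicate (rn : Int) (n : Nat) :
    ∀ (f : Int) (b : PySem.Dict String String),
      (PySem.List.enumerate (List.replicate n '.') f).foldl (stepB rn) b = b := by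
  induction n with
  | zero => intro f b; simp [PySem.List.enumerate_nil]
  | succ m ih =>
      intro f b
      simp only [List.replicate_succ, PySem.List.enumerate_cons, List.foldl_cons]
      rw [show stepB rn b (f, '.') = b by simp [stepB]]
      exact ih (f + 1) b

-- the rank loops agree: A's accumulator fold = B's fold over the enumerated expansion
theorem rank_eq (rn : Int) :
    ∀ (chars : List Char), chars.all pvFenChar = true →
      ∀ (b : PySem.Dict String String) (f : Int), 0 ≤ f →
        (chars.foldl (stepA rn) (b, f)).1 =
          (PySem.List.enumerate (expandB chars) f).foldl (stepB rn) b := by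
  intro chars
  induction chars with
  | nil => intro _ b f _; simp [expandB, PySem.List.enumerate_nil]
  | cons c cs ih =>
      intro hall b f hf
      simp only [List.all_cons, Bool.and_eq_true] at hall
      obtain ⟨hdot, hdig⟩ := pvFenChar_facts c hall.1
      have hexp : expandB (c :: cs) =
          (if PySem.Chars.isdigit c then
            List.replicate ((PySem.Int.ofStr? (String.mk [c])).getD 0).toNat '.'
          else [c]) ++ expandB cs := by
        simp [expandB]
      by_cases hd : PySem.Chars.isdigit c = true
      · rw [hexp, if_pos hd]
        have hv := hdig hd
        rw [PySem.List.enumerate_append, List.foldl_append, foldl_stepB_replicate]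
        simp only [List.foldl_cons, stepA, hd, if_pos, List.length_replicate]
        rw [hv]
        have : ((((c.toNat - 48 : Nat) : Int)).toNat : Int) = ((c.toNat - 48 : Nat) : Int) := by
          simp
        rw [this]
        exact ih hall.2 b (f + ((c.toNat - 48 : Nat) : Int)) (by positivity)
      · rw [hexp, if_neg hd]
        rw [PySem.List.enumerate_append]
        simp only [PySem.List.enumerate_cons, PySem.List.enumerate_nil, List.length_cons,
          List.length_nil, List.foldl_append, List.foldl_cons, List.foldl_nil]
        simp only [stepA, hd, Bool.false_eq_true, if_false]
        rw [show stepB rn b (f, c) = (match FEN_TO_LABEL.get? c with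
              | some lbl => b.insert (String.mk (Char.ofNat ('a'.toNat + f.toNat) :: PySem.Int.toChars rn)) lbl
              | none => b) by simp [stepB, hdot]]
        cases FEN_TO_LABEL.get? c with
        | none => exact ih hall.2 b (f + 1) (by omega)
        | some lbl => exact ih hall.2 _ (f + 1) (by omega)

-- ===== VERDICT (by name: the statement is the Claim_ definition above) =====
theorem outer_eq :
    ∀ (L : List (List Char)), (∀ r ∈ L, r.all pvFenChar = true) →
      ∀ (s : Int) (b : PySem.Dict String String),
        (PySem.List.enumerate L s).foldl
          (fun (board : PySem.Dict String String) p => ((p.2.foldl (stepA (8 - p.1)) (board, 0)).1)) b =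
        (PySem.List.enumerate L s).foldl
          (fun (board : PySem.Dict String String) p =>
            (PySem.List.enumerate (expandB p.2) 0).foldl (stepB (8 - p.1)) board) b := by
  intro L
  induction L with
  | nil => intro _ s b; simp [PySem.List.enumerate_nil]
  | cons r rs ih =>
      intro hmem s b
      simp only [PySem.List.enumerate_cons, List.foldl_cons]
      rw [rank_eq (8 - s) r (hmem r (by simp)) b 0 le_rfl]
      exact ih (fun x hx => hmem x (by simp [hx])) (s + 1) _

-- ===== VERDICT (by name: the statement is the Claim_ definition above) =====
theorem fen_to_board_spec : Claim_equal_fen_to_board := by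
  intro fen _ hpre
  unfold Spec_fen_to_board fen_to_board fen_to_board_alt
  congr 1
  apply outer_eq
  unfold Pre_fen_to_board at hpre
  simpa [List.all_eq_true] using hpre
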